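-- pv_equiv track=rewrite | github.com/foreverxujiahuan/algorithm | 哈希表/A1914.py | minItem
-- ===== SOURCE A (Python) =====
-- def minItem(ids, m):
--     # write your code here
--     id2cnt = dict()
--     for i in ids:
--         if i in id2cnt.keys():
--             id2cnt[i] += 1
--         else:
--             id2cnt[i] = 1
--     cnt_list = list(id2cnt.values())
--     cnt_list = sorted(cnt_list)
--     res = len(cnt_list)
--     for cnt in cnt_list:
--         if cnt > m:
--             break
--         else:
--             m -= cnt
--             res = res - 1
--     return res
-- ===== SOURCE B (Python) =====
-- def minItem(ids, m):
--     id2cnt = {}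
--     for i in ids:
--         id2cnt[i] = id2cnt.get(i, 0) + 1
--     counts = list(id2cnt.values())
--     res = len(counts)
--     if not counts:
--         return res
--     maxc = max(counts)
--     bucket = {}
--     for c in counts:
--         bucket[c] = bucket.get(c, 0) + 1
--     budget = max(m, 0)
--     for c in range(1, maxc + 1):
--         num = bucket.get(c, 0)
--         k = min(num, budget // c)
--         res -= k
--         budget -= c * k
--         if k < num:
--             break
--     return res
-- ===== Notes on version B (the rewrite author's own statement) =====
-- stated objective: alternative
-- what changed: Replaces sorting the frequency values and scanning them with a break by a counting-sort bucket table: iterate candidate counts c = 1..max upward, removing k = min(bucket[c], budget//c) ids per bucket in O(1) arithmetic, breaking when a bucket cannot be fully consumed.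
import Mathlib
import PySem

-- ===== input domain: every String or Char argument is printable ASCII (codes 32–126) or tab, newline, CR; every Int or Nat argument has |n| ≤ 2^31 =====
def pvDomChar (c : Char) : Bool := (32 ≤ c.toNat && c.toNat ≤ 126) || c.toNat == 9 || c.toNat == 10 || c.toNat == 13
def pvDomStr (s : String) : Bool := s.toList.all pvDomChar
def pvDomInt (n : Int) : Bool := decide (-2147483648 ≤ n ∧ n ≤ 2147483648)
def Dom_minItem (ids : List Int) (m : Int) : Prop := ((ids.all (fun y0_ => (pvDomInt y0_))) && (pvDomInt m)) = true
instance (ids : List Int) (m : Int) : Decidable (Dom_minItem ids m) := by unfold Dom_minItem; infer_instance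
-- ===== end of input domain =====

-- B replaces sorting the frequency values (then scanning them with a break) by a counting-sort
-- bucket table scanned from count 1 upward, removing each affordable bucket in O(1) arithmetic;
-- alternative algorithm, same return value on every input.

-- ===== PORT A =====
-- A's 'for cnt in cnt_list: if cnt > m: break …' loop, carrying (m, res)
def minItemLoop : List Int → Int → Int → Int
  | [], _, res => res
  | cnt :: rest, m, res => if cnt > m then res else minItemLoop rest (m - cnt) (res - 1)

def minItem (ids : List Int) (m : Int) : Int :=
  let id2cnt := ids.foldl
    (fun d i => if d.contains i then d.modify i 0 (· + 1) else d.insert i 1)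
    PySem.Dict.empty
  let cnt_list := PySem.List.sorted id2cnt.values (fun x => x) false
  minItemLoop cnt_list m (cnt_list.length : Int)

-- ===== PORT B =====
-- Source B's 'for c in range(1, maxc+1): …' loop, carrying (budget, res); the break returns res - k
def minItemAltLoop : List Int → PySem.Dict Int Int → Int → Int → Int
  | [], _, _, res => res
  | c :: cs, bucket, budget, res =>
    let num := bucket.getD c 0
    let k := min num (PySem.Int.floordiv budget c)
    if k < num then res - k
    else minItemAltLoop cs bucket (budget - c * k) (res - k)

def minItem_alt (ids : List Int) (m : Int) : Int :=
  let id2cnt := ids.foldl (fun d i => d.insert i (d.getD i 0 + 1)) PySem.Dict.empty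
  let counts := id2cnt.values
  let res := (counts.length : Int)
  match PySem.List.max? counts (fun x => x) with
  | none => res
  | some maxc =>
    let bucket := counts.foldl (fun d c => d.insert c (d.getD c 0 + 1)) PySem.Dict.empty
    minItemAltLoop (PySem.List.pyRange 1 (maxc + 1) 1) bucket (max m 0) res

-- ===== PRECONDITION & SPEC =====
def Spec_minItem (ids : List Int) (m : Int) (out : Int) : Prop := out = minItem_alt ids m
instance (ids : List Int) (m : Int) (out : Int) : Decidable (Spec_minItem ids m out) := by unfold Spec_minItem; infer_instance

-- ===== CLAIM (what is proved, stated in full; the proofs are below) =====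
def Claim_equal_minItem : Prop := ∀ (ids : List Int) (m : Int), Dom_minItem ids m → Spec_minItem ids m (minItem ids m)

-- ===== LEMMAS AND PROOFS =====

-- A's dict-building step is exactly the Counter step
theorem stepA_eq_counter (ids : List Int) :
    ids.foldl (fun d i => if d.contains i then d.modify i 0 (· + 1) else d.insert i 1)
      PySem.Dict.empty = PySem.Dict.counter ids := by
  rw [PySem.Dict.counter_eq_foldl]
  apply List.foldl_ext
  intro d i _
  by_cases h : d.contains i = true
  · simp [h]
  · simp only [Bool.not_eq_true] at h
    simp [h, PySem.Dict.modify, PySem.Dict.getD_of_not_contains d 0 h]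

-- A's loop over n copies of c followed by rest: it consumes k = min n (budget / c) of them,
-- breaking (with res - k) iff k < n
theorem minItemLoop_replicate (c : Int) (hc : 1 ≤ c) :
    ∀ (n : Nat) (rest : List Int) (budget res : Int), 0 ≤ budget →
    minItemLoop (List.replicate n c ++ rest) budget res =
      (if min (n : Int) (budget / c) < (n : Int)
       then res - min (n : Int) (budget / c)
       else minItemLoop rest (budget - c * min (n : Int) (budget / c))
              (res - min (n : Int) (budget / c))) := by
  intro n
  induction n with
  | zero =>
    intro rest budget res hb
    have hq : 0 ≤ budget / c := Int.ediv_nonneg hb (by omega)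
    simp only [List.replicate_zero, List.nil_append, Nat.cast_zero]
    rw [min_eq_left hq, if_neg (by omega)]
    norm_num
  | succ n ih =>
    intro rest budget res hb
    have hq : 0 ≤ budget / c := Int.ediv_nonneg hb (by omega)
    rw [List.replicate_succ, List.cons_append]
    by_cases hcm : c > budget
    · have hq0 : budget / c = 0 := Int.ediv_eq_zero_of_lt hb hcm
      have : min ((n:Nat).succ : Int) (budget / c) = 0 := by
        rw [hq0]; omega
      simp [minItemLoop, hcm]
      omega
    · rw [not_lt] at hcm
      have hq1 : 1 ≤ budget / c := (Int.le_ediv_iff_mul_le (by omega)).2 (by omega)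
      have hstep : (budget - c) / c = budget / c - 1 := by
        have := Int.add_mul_ediv_right budget (-1) (c := c) (by omega)
        simpa using this
      have hrec := ih rest (budget - c) (res - 1) (by
        have := (Int.le_ediv_iff_mul_le (show (0:Int) < c by omega)).1 hq1
        omega)
      simp only [minItemLoop, if_neg (by omega : ¬ c > budget)]
      rw [hrec, hstep]
      have hkey : min ((n.succ : Nat) : Int) (budget / c) = min (n : Int) (budget / c - 1) + 1 := by
        push_cast; omega
      by_cases hlt : min (n : Int) (budget / c - 1) < n
      · rw [if_pos hlt, if_pos (by push_cast; omega)]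
        rw [hkey]; ring
      · rw [if_neg hlt, if_neg (by push_cast; omega)]
        rw [hkey]
        ring_nf

-- sorted cs splits off all the copies of its lower bound lo first
theorem sorted_split (lo : Int) (cs : List Int) (h : ∀ c ∈ cs, lo ≤ c) :
    PySem.List.sorted cs (fun x => x) false =
      List.replicate (cs.count lo) lo ++
        PySem.List.sorted (cs.filter (fun c => !(c == lo))) (fun x => x) false := by
  apply List.eq_of_perm_of_sorted (le := fun a b => a ≤ b)
  · intro a b _ _ h1 h2; omega
  · exact PySem.List.sorted_pairwise cs (fun x => x)
  · apply List.pairwise_append.2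
    refine ⟨List.pairwise_replicate.2 (Or.inr (le_refl lo)),
      PySem.List.sorted_pairwise _ (fun x => x), ?_⟩
    intro a ha b hb
    have ha' : a = lo := List.eq_of_mem_replicate ha
    have hb' : b ∈ cs.filter (fun c => !(c == lo)) := (PySem.List.mem_sorted _ _ _ b).1 hb
    subst ha'
    exact h b (List.mem_of_mem_filter hb')
  · refine (PySem.List.sorted_perm cs (fun x => x) false).trans ?_
    refine ((List.filter_append_perm (fun x => x == lo) cs).symm.trans ?_)
    rw [List.filter_beq lo]
    exact List.Perm.append_left _ (PySem.List.sorted_perm _ (fun x => x) false).symm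

-- core equivalence: A's scan of the sorted counts equals B's bucket scan from lo upward
theorem main_loop (fuel : Nat) : ∀ (lo maxc : Int) (cs : List Int)
    (bucket : PySem.Dict Int Int) (budget res : Int),
    fuel = (maxc + 1 - lo).toNat → 0 ≤ budget → 1 ≤ lo →
    (∀ c ∈ cs, lo ≤ c ∧ c ≤ maxc) →
    (∀ c, lo ≤ c → bucket.getD c 0 = (cs.count c : Int)) →
    minItemLoop (PySem.List.sorted cs (fun x => x) false) budget res =
      minItemAltLoop (PySem.List.pyRange lo (maxc + 1) 1) bucket budget res := by
  induction fuel with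
  | zero =>
    intro lo maxc cs bucket budget res hf hb0 hlo hmem hb
    have hcs : cs = [] := by
      apply List.eq_nil_iff_forall_not_mem.2
      intro c hc
      have := hmem c hc
      omega
    subst hcs
    rw [PySem.List.pyRange_one_eq_nil (by omega)]
    simp [minItemLoop, minItemAltLoop, PySem.List.sorted]
  | succ fuel ih =>
    intro lo maxc cs bucket budget res hf hb0 hlo hmem hb
    have hlt : lo < maxc + 1 := by omega
    rw [PySem.List.pyRange_one_cons hlt]
    have hfd : PySem.Int.floordiv budget lo = budget / lo := by
      show Int.fdiv budget lo = budget / lo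
      rw [Int.fdiv_eq_ediv, if_pos (Or.inl (by omega))]; ring
    have hq0 : 0 ≤ budget / lo := Int.ediv_nonneg hb0 (by omega)
    simp only [minItemAltLoop, hfd, hb lo (le_refl lo)]
    rw [sorted_split lo cs (fun c hc => (hmem c hc).1)]
    rw [minItemLoop_replicate lo hlo (cs.count lo) _ budget res hb0]
    set n : Int := (cs.count lo : Int) with hn
    set k : Int := min n (budget / lo) with hk
    by_cases hcase : k < n
    · rw [if_pos hcase, if_pos hcase]
    · rw [if_neg hcase, if_neg hcase]
      have hkq : k ≤ budget / lo := min_le_right _ _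
      have hbud : 0 ≤ budget - lo * k := by
        have h1 : lo * k ≤ lo * (budget / lo) := by
          apply mul_le_mul_of_nonneg_left hkq (by omega)
        have h2 : budget / lo * lo ≤ budget := Int.ediv_mul_le budget (by omega)
        nlinarith
      apply ih (lo + 1) maxc (cs.filter (fun c => !(c == lo))) bucket _ _
        (by omega) hbud (by omega)
      · intro c hc
        have hmf := List.mem_of_mem_filter hc
        have hne : ¬ (c == lo) = true := by
          have := List.of_mem_filter hc; simpa using this
        have := hmem c hmf
        simp at hne
        omega
      · intro c hc
        rw [List.count_filter (by simp; omega)]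
        exact hb c (by omega)

-- A's scan returns res unchanged when the budget is ≤ 0 and every count is ≥ 1
theorem minItemLoop_nonpos (xs : List Int) (m res : Int)
    (h : ∀ c ∈ xs, 1 ≤ c) (hm : m ≤ 0) : minItemLoop xs m res = res := by
  cases xs with
  | nil => rfl
  | cons c t =>
    have : c > m := by have := h c (by simp); omega
    simp [minItemLoop, this]

theorem minItem_eq (ids : List Int) (m : Int) : minItem ids m = minItem_alt ids m := by
  unfold minItem minItem_alt
  simp only [stepA_eq_counter, PySem.Dict.foldl_insert_getD_add_one_eq_counter]
  set counts := (PySem.Dict.counter ids).values with hcounts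
  have hpos : ∀ c ∈ counts, 1 ≤ c := by
    intro c hc
    rw [hcounts] at hc
    simp only [PySem.Dict.values, PySem.Dict.items_counter, List.map_map, List.mem_map] at hc
    obtain ⟨k, hk, rfl⟩ := hc
    have hkids : k ∈ ids := (PySem.Set.mem_ofList ids k).1 hk
    have : 0 < ids.count k := List.count_pos_iff.2 hkids
    simp only [Function.comp_apply]
    exact_mod_cast this
  cases hmx : PySem.List.max? counts (fun x => x) with
  | none =>
    have hnil : counts = [] := (PySem.List.max?_eq_none_iff _ _).1 hmx
    rw [hnil]
    simp [minItemLoop, PySem.List.sorted]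
  | some maxc =>
    have hmax : ∀ c ∈ counts, c ≤ maxc := by
      intro c hc; exact PySem.List.max?_isMax hmx c hc
    have hmem : ∀ c ∈ counts, 1 ≤ c ∧ c ≤ maxc := fun c hc => ⟨hpos c hc, hmax c hc⟩
    have hb : ∀ c, (1:Int) ≤ c →
        (PySem.Dict.counter counts).getD c 0 = (counts.count c : Int) := by
      intro c _; exact PySem.Dict.getD_counter counts c
    have hml := main_loop (maxc + 1 - 1).toNat 1 maxc counts (PySem.Dict.counter counts)
      (max m 0) ((counts.length : Int)) rfl (by omega) (by omega) hmem hb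
    rw [PySem.List.length_sorted]
    by_cases hm : 0 ≤ m
    · simpa [max_eq_left hm] using hml
    · rw [minItemLoop_nonpos _ m _ (fun c hc => hpos c ((PySem.List.mem_sorted _ _ _ c).1 hc)) (by omega)]
      rw [max_eq_right (by omega : m ≤ (0:Int))] at hml
      rw [minItemLoop_nonpos _ 0 _ (fun c hc => hpos c ((PySem.List.mem_sorted _ _ _ c).1 hc)) (le_refl 0)] at hml
      simpa [max_eq_right (by omega : m ≤ (0:Int))] using hml

-- ===== VERDICT (by name: the statement is the Claim_ definition above) =====
theorem minItem_spec : Claim_equal_minItem := by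
  intro ids m _
  exact minItem_eq ids m
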